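-- pv_equiv track=rewrite | github.com/Tatynaae/some-algorithms | ainaxics-algorithm.py | find_element_at_k
-- ===== SOURCE A (Python) =====
-- def find_element_at_k(n, k):
--     if n == 1:
--         return 1
--
--     half_length = 2**(n - 1)
--
--     if k == half_length:
--         return n
--
--     if k > half_length:
--         k = 2 * half_length - k
--
--     return find_element_at_k(n - 1, k)
-- ===== SOURCE B (Python) =====
-- def find_element_at_k(n, k):
--     # value at position k of the length-(2^n - 1) ruler sequence:
--     # out-of-range positions fall through A's recursion to the n == 1 base case (1);
--     # in range, the answer is the number of trailing zero bits of k, plus 1.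
--     if k <= 0 or k >= 2**n:
--         return 1
--     r = 1
--     while k % 2 == 0:
--         k //= 2
--         r += 1
--     return r
-- ===== Notes on version B (the rewrite author's own statement) =====
-- stated objective: alternative
-- what changed: replaces A's n-deep mirroring recursion on huge 2**(n-1) powers by a direct trailing-zero count of k (2-adic valuation + 1) after a single range test
-- intended difference: For n <= 0 with k = 0 (and the stray case n = 0, k = 1, where k collapses to float 0.0) A's float 2**(n-1) underflows and A returns the underflow exponent artefact min(n, -1074) instead of a sequence value; B returns 1, the same value A's own base case yields for every other out-of-range position, which is the intended out-of-range answer. — e.g. on find_element_at_k(0, 0): A returns -1074, B returns 1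
-- outside the precondition, e.g. on find_element_at_k(0, -3): A raises RecursionError, B returns 1
import Mathlib
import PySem

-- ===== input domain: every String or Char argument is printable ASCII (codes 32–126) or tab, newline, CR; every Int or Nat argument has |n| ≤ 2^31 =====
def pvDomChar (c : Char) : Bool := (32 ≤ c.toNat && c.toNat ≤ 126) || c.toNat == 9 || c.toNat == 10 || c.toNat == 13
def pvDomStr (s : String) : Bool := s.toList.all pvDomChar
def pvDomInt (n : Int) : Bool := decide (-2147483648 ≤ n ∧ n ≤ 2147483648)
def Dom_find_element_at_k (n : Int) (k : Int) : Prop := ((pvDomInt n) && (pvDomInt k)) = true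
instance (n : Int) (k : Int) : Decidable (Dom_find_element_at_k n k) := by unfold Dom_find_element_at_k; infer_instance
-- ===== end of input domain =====

-- B replaces A's n-level mirroring recursion (with 2^(n-1)-sized powers) by a direct
-- trailing-zero count of k after one range test — a genuinely different
-- algorithm for the same exact value (no speed claim).

-- ===== PORT A =====
-- Fuel-counted transliteration of A's recursion; the recursion lowers n by exactly 1 each
-- call, so fuel (n + 1075).toNat + 2 covers every path on which the Python returns: for
-- n ≥ 1 the n-deep integer descent, and for n ≤ 0 the descent of the float branch below.
-- For n ≤ 0 Python's 2**(n-1) is a FLOAT; that branch is hand-ported, exact wherever the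
-- Python returns: 2.0^(n-1) is 0.0 for n ≤ -1074 (k == 0.0 fires, returning n) and a
-- positive subnormal < 1 otherwise (an integer k never equals it; k ≥ 1 exceeds it and is
-- reflected — at n = 0 exactly to 1 - k, for n < 0 to a negative float on which the
-- recursion never returns (RecursionError, outside Pre_), modelled here as -k).
def find_element_at_k_go : Nat → Int → Int → Int
  | 0, _, _ => 1
  | fuel+1, n, k =>
    if n = 1 then 1
    else if n ≤ 0 then
      -- float branch (see header comment)
      if n ≤ -1074 then
        if k = 0 then n
        else if 1 ≤ k then find_element_at_k_go fuel (n - 1) (-k)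
        else find_element_at_k_go fuel (n - 1) k
      else
        if 1 ≤ k then
          if n = 0 then find_element_at_k_go fuel (n - 1) (1 - k)
          else find_element_at_k_go fuel (n - 1) (-k)
        else find_element_at_k_go fuel (n - 1) k
    else
      let half : Int := 2 ^ (n - 1).toNat   -- exact for n ≥ 1
      if k = half then n
      else if k > half then find_element_at_k_go fuel (n - 1) (2 * half - k)
      else find_element_at_k_go fuel (n - 1) k

def find_element_at_k (n : Int) (k : Int) : Int :=
  find_element_at_k_go ((n + 1075).toNat + 2) n k

-- ===== PORT B =====
-- The while loop of Source B; the `0 < k` conjunct is only a totality guard: the loop is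
-- entered solely with k > 0 (k ≤ 0 already returned 1), where it is Python-exact.
def find_element_at_k_altLoop (k : Int) (r : Int) : Int :=
  if 0 < k ∧ PySem.Int.mod k 2 = 0 then
    find_element_at_k_altLoop (PySem.Int.floordiv k 2) (r + 1)
  else r
termination_by k.toNat
decreasing_by
  simp only [PySem.Int.floordiv_eq_ediv_of_pos (by norm_num : (0:Int) < 2)]
  omega

-- `2 ^ n.toNat` ports Python's `k >= 2**n`: for n ≥ 1 it is exact, and for n ≤ 0 Python
-- compares the positive k against the float 2**n ∈ (0,1], which k ≥ 1 = 2^0 also decides.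
def find_element_at_k_alt (n : Int) (k : Int) : Int :=
  if k ≤ 0 ∨ (2:Int) ^ n.toNat ≤ k then 1
  else find_element_at_k_altLoop k 1

-- ===== PRECONDITION & SPEC =====
-- Pre_ excludes exactly the inputs on which A never returns (RecursionError): the n ≤ 0
-- inputs whose float-branch descent never terminates — every k except the two cases
-- k = 0 and (n = 0, k = 1), on which the descent stops and A returns (those stay inside
-- Pre_, as D_ below).  (A's n-level descent also needs a recursion limit above n, an
-- environment setting, not an input property; Pre_ does not cap n.)
def Pre_find_element_at_k (n : Int) (k : Int) : Prop :=
  1 ≤ n ∨ (n ≤ 0 ∧ (k = 0 ∨ (n = 0 ∧ k = 1)))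
instance (n : Int) (k : Int) : Decidable (Pre_find_element_at_k n k) := by
  unfold Pre_find_element_at_k; infer_instance

def pvWitness_find_element_at_k : Int × Int := (5, 12)

-- For n ≤ 0 with k = 0 (and the stray case n = 0, k = 1, where k collapses to float 0.0)
-- A's float 2**(n-1) underflows and A returns the underflow-exponent artefact
-- min(n, -1074) instead of a sequence value; B returns 1, the same value A's own base
-- case yields for every other out-of-range position, which is the intended answer.
def D_find_element_at_k (n : Int) (k : Int) : Prop :=
  n ≤ 0 ∧ (k = 0 ∨ (n = 0 ∧ k = 1))
instance (n : Int) (k : Int) : Decidable (D_find_element_at_k n k) := by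
  unfold D_find_element_at_k; infer_instance

def Spec_find_element_at_k (n : Int) (k : Int) (out : Int) : Prop :=
  ¬ D_find_element_at_k n k → out = find_element_at_k_alt n k
instance (n : Int) (k : Int) (out : Int) : Decidable (Spec_find_element_at_k n k out) := by
  unfold Spec_find_element_at_k; infer_instance

def pvDiffWitness_find_element_at_k : Int × Int := (0, 0)
def pvDiffWitnessOut_find_element_at_k : Int × Int := (-1074, 1)

-- ===== CLAIM (what is proved, stated in full; the proofs are below) =====
def Claim_unchanged_find_element_at_k : Prop := ∀ (n : Int) (k : Int), Dom_find_element_at_k n k → Pre_find_element_at_k n k → Spec_find_element_at_k n k (find_element_at_k n k)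

def Claim_changed_find_element_at_k : Prop := Dom_find_element_at_k (pvDiffWitness_find_element_at_k.1) (pvDiffWitness_find_element_at_k.2) ∧ Pre_find_element_at_k (pvDiffWitness_find_element_at_k.1) (pvDiffWitness_find_element_at_k.2) ∧ D_find_element_at_k (pvDiffWitness_find_element_at_k.1) (pvDiffWitness_find_element_at_k.2) ∧ find_element_at_k (pvDiffWitness_find_element_at_k.1) (pvDiffWitness_find_element_at_k.2) = pvDiffWitnessOut_find_element_at_k.1 ∧ find_element_at_k_alt (pvDiffWitness_find_element_at_k.1) (pvDiffWitness_find_element_at_k.2) = pvDiffWitnessOut_find_element_at_k.2 ∧ pvDiffWitnessOut_find_element_at_k.1 ≠ pvDiffWitnessOut_find_element_at_k.2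

def Claim_exact_find_element_at_k : Prop := ∀ (n : Int) (k : Int), Dom_find_element_at_k n k → Pre_find_element_at_k n k → D_find_element_at_k n k → find_element_at_k n k ≠ find_element_at_k_alt n k

-- ===== LEMMAS AND PROOFS =====

theorem altLoop_exit (k r : Int) (h : ¬(0 < k ∧ PySem.Int.mod k 2 = 0)) :
    find_element_at_k_altLoop k r = r := by
  rw [find_element_at_k_altLoop, if_neg h]

theorem altLoop_step (k r : Int) (h0 : 0 < k) (h2 : PySem.Int.mod k 2 = 0) :
    find_element_at_k_altLoop k r = find_element_at_k_altLoop (k / 2) (r + 1) := by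
  rw [find_element_at_k_altLoop, if_pos ⟨h0, h2⟩,
    PySem.Int.floordiv_eq_ediv_of_pos (by norm_num : (0:Int) < 2)]

theorem mod_two_emod (k : Int) : PySem.Int.mod k 2 = k % 2 :=
  PySem.Int.mod_eq_emod_of_pos (by norm_num)

-- value on a pure power of two: each step strips one factor 2
theorem altLoop_pow (m : Nat) : ∀ r : Int, find_element_at_k_altLoop ((2:Int) ^ m) r = r + m := by
  induction m with
  | zero =>
      intro r
      rw [pow_zero, altLoop_exit 1 r (by rw [mod_two_emod]; omega)]
      simp
  | succ m ih =>
      intro r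
      rw [altLoop_step _ _ (by positivity) (by rw [mod_two_emod, pow_succ]; omega),
          show (2:Int) ^ (m + 1) / 2 = 2 ^ m from by rw [pow_succ]; omega, ih]
      push_cast; ring

-- mirror symmetry of the trailing-zero count: v2(2^m - k) = v2(k) for 0 < k < 2^m
theorem altLoop_mirror : ∀ (K : Nat) (k : Int) (m : Nat) (r : Int), k.toNat ≤ K → 0 < k →
    k < 2 ^ m → find_element_at_k_altLoop ((2:Int) ^ m - k) r = find_element_at_k_altLoop k r := by
  intro K
  induction K with
  | zero => intro k m r hK h0 _; omega
  | succ K ih =>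
      intro k m r hK h0 hm
      have hm1 : 1 ≤ m := by
        by_contra h
        have : m = 0 := by omega
        subst this; simp at hm; omega
      rcases Int.even_or_odd k with ⟨j, hj⟩ | ⟨j, hj⟩
      · -- k = 2j even: both sides step once, recurse at m-1 with j
        have h2 : PySem.Int.mod k 2 = 0 := by rw [mod_two_emod]; omega
        have hj0 : 0 < j := by omega
        have hpow : (2:Int) ^ m = 2 * 2 ^ (m - 1) := by
          rw [← pow_succ']; congr 1; omega
        have h2' : PySem.Int.mod ((2:Int) ^ m - k) 2 = 0 := by
          rw [mod_two_emod, hpow]; omega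
        rw [altLoop_step _ _ (by omega) h2,
            altLoop_step _ _ (by omega : (0:Int) < 2 ^ m - k) h2',
            show ((2:Int) ^ m - k) / 2 = 2 ^ (m - 1) - j from by rw [hpow]; omega,
            show k / 2 = j from by omega]
        exact ih j (m - 1) (r + 1) (by omega) hj0 (by rw [hpow] at hm; omega)
      · -- k odd: 2^m - k is odd too, both loops exit
        have h2 : ¬(0 < k ∧ PySem.Int.mod k 2 = 0) := by rw [mod_two_emod]; omega
        have hpow : (2:Int) ^ m = 2 * 2 ^ (m - 1) := by
          rw [← pow_succ']; congr 1; omega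
        have h2' : ¬(0 < (2:Int) ^ m - k ∧ PySem.Int.mod ((2:Int) ^ m - k) 2 = 0) := by
          rw [mod_two_emod, hpow]; omega
        rw [altLoop_exit _ _ h2, altLoop_exit _ _ h2']

-- characterization of B's port with the exponent made explicit
theorem alt_char (N : Nat) (n k : Int) (hn : n = (N : Int)) :
    find_element_at_k_alt n k =
      if k ≤ 0 ∨ (2:Int) ^ N ≤ k then 1 else find_element_at_k_altLoop k 1 := by
  subst hn; unfold find_element_at_k_alt; rw [Int.toNat_natCast]

-- A's recursion agrees with B everywhere at n ≥ 1, given fuel at least n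
theorem go_pos : ∀ (fuel : Nat) (n k : Int), 1 ≤ n → n ≤ (fuel : Int) →
    find_element_at_k_go fuel n k = find_element_at_k_alt n k := by
  intro fuel
  induction fuel with
  | zero => intro n k h1 hf; simp at hf; omega
  | succ fuel ih =>
      intro n k h1 hf
      by_cases hbase : n = 1
      · -- base case n = 1: A returns 1; B returns 1 for every k since altLoop 1 1 = 1
        subst hbase
        have hgo : find_element_at_k_go (fuel + 1) 1 k = 1 := by
          simp [find_element_at_k_go]
        rw [hgo, alt_char 1 1 k (by norm_num)]
        by_cases hk : k ≤ 0 ∨ (2:Int) ^ 1 ≤ k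
        · rw [if_pos hk]
        · rw [if_neg hk]
          have hk1 : k = 1 := by simp only [not_or, not_le] at hk; omega
          subst hk1
          rw [altLoop_exit 1 1 (by rw [mod_two_emod]; omega)]
      · obtain ⟨N, hN⟩ : ∃ N : Nat, n = (N : Int) + 1 := ⟨(n - 1).toNat, by omega⟩
        have hN1 : 1 ≤ N := by omega
        have htn : (n - 1).toNat = N := by omega
        simp only [find_element_at_k_go, if_neg hbase, if_neg (by omega : ¬ n ≤ 0), htn]
        rw [alt_char (N + 1) n k (by push_cast; omega)]
        have hpow : (2:Int) ^ (N + 1) = 2 * 2 ^ N := by rw [pow_succ]; ring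
        have hpos : (0:Int) < 2 ^ N := by positivity
        by_cases hk : k = (2:Int) ^ N
        · -- k hits the midpoint: A returns n, B counts N trailing zeros of 2^N
          rw [if_pos hk, if_neg (by rw [hpow]; omega), hk, altLoop_pow]
          omega
        · rw [if_neg hk]
          by_cases hgt : k > (2:Int) ^ N
          · rw [if_pos hgt]
            rw [ih (n - 1) (2 * 2 ^ N - k) (by omega) (by omega),
                alt_char N (n - 1) _ (by omega)]
            by_cases hbig : (2:Int) ^ (N + 1) ≤ k
            · -- reflected index ≤ 0 on both sides: both return 1
              rw [if_pos (by rw [hpow] at hbig; omega),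
                  if_pos (Or.inr hbig)]
            · -- proper mirror step: v2 is preserved by k ↦ 2^(N+1) - k
              rw [hpow] at hbig
              rw [if_neg (by omega), if_neg (by omega), ← hpow]
              exact altLoop_mirror k.toNat k (N + 1) 1 le_rfl (by omega) (by rw [hpow]; omega)
          · rw [if_neg hgt]
            rw [ih (n - 1) k (by omega) (by omega), alt_char N (n - 1) k (by omega)]
            by_cases hk0 : k ≤ 0
            · rw [if_pos (Or.inl hk0), if_pos (Or.inl hk0)]
            · rw [if_neg (by omega), if_neg (by rw [hpow]; omega)]

-- A's float branch at k = 0: the descent stops at the underflow exponent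
theorem go_zero : ∀ (fuel : Nat) (n : Int), n ≤ 0 → (n + 1074).toNat < fuel →
    find_element_at_k_go fuel n 0 = if n ≤ -1074 then n else -1074 := by
  intro fuel
  induction fuel with
  | zero => intro n hn hf; omega
  | succ fuel ih =>
      intro n hn hf
      by_cases hlow : n ≤ -1074
      · rw [if_pos hlow]
        simp only [find_element_at_k_go, if_neg (by omega : ¬ n = 1),
          if_pos hn, if_pos hlow]
        simp
      · rw [if_neg hlow]
        simp only [find_element_at_k_go, if_neg (by omega : ¬ n = 1),
          if_pos hn, if_neg hlow, if_neg (by omega : ¬ (1:Int) ≤ 0)]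
        rw [ih (n - 1) (by omega) (by omega)]
        by_cases h : n - 1 ≤ -1074
        · rw [if_pos h]; omega
        · rw [if_neg h]

theorem A_in_D (n k : Int) (hD : D_find_element_at_k n k) :
    find_element_at_k n k = if n ≤ -1074 then n else -1074 := by
  obtain ⟨hn, hk⟩ := hD
  rcases hk with hk0 | ⟨hn0, hk1⟩
  · subst hk0
    exact go_zero _ n hn (by omega)
  · subst hn0; subst hk1
    -- n = 0, k = 1: one reflection step to k = 0, then the k = 0 descent
    show find_element_at_k_go 1077 0 1 = _
    have hstep : ∀ fuel : Nat, find_element_at_k_go (fuel + 1) 0 1 =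
        find_element_at_k_go fuel (-1) 0 := by
      intro fuel; simp [find_element_at_k_go]
    rw [show (1077:Nat) = 1076 + 1 from rfl, hstep 1076,
        go_zero 1076 (-1) (by omega) (by omega)]
    norm_num

theorem B_in_D (n k : Int) (hD : D_find_element_at_k n k) :
    find_element_at_k_alt n k = 1 := by
  obtain ⟨hn, hk⟩ := hD
  unfold find_element_at_k_alt
  rcases hk with hk0 | ⟨hn0, hk1⟩
  · rw [if_pos (Or.inl (by omega))]
  · subst hn0; subst hk1
    rw [if_pos (Or.inr (by norm_num))]

-- ===== VERDICT (by name: the statements are the Claim_ definitions above) =====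
theorem find_element_at_k_spec : Claim_unchanged_find_element_at_k := by
  intro n k _ hpre
  unfold Spec_find_element_at_k
  intro hD
  have h1 : 1 ≤ n := by
    rcases hpre with h | h
    · exact h
    · exact absurd h hD
  exact go_pos _ n k h1 (by omega)

theorem find_element_at_k_changed : Claim_changed_find_element_at_k := by
  unfold Claim_changed_find_element_at_k
  refine ⟨by decide, by decide, by decide, ?_, by decide, by decide⟩
  show find_element_at_k 0 0 = -1074
  rw [A_in_D 0 0 (by decide)]; norm_num

theorem find_element_at_k_tight : Claim_exact_find_element_at_k := by
  intro n k _ _ hD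
  rw [A_in_D n k hD, B_in_D n k hD]
  split_ifs with h <;> omega
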